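-- pv_equiv track=rewrite | github.com/pawlowiczf/WDI-2023 | WDI zestaw 2/14 budowanie trzeciej liczby, pierwsza.py | nowa_liczba
-- ===== SOURCE A (Python) =====
-- def nowa_liczba(a, b, mask):
--     liczba = 0
--     counter = 0
--     num_of_digits = len( str(a) ) + len( str(b) )
--
--     while counter != num_of_digits:
--         if mask % 2 == 0 :
--             liczba += ( b % 10 ) * ( 10**counter )
--             b = b//10
--             mask = mask // 2
--             counter += 1
--         else:
--             liczba += (a % 10) * ( 10**counter )
--             a = a//10
--             mask = mask // 2
--             counter += 1
--     #end while
--     return liczba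
-- ===== SOURCE B (Python) =====
-- def nowa_liczba(a, b, mask):
--     # Scatter algorithm: precompute the target positions of a's and b's digits
--     # from the mask bits, then place each number's digits independently by
--     # random access (no mutation of a, b or mask, no interleaved loop).
--     n = len(str(a)) + len(str(b))
--     pos_a = [i for i in range(n) if mask // 2**i % 2 == 1]
--     pos_b = [i for i in range(n) if mask // 2**i % 2 == 0]
--     total = 0
--     for j, p in enumerate(pos_a):
--         total += a // 10**j % 10 * 10**p
--     for j, p in enumerate(pos_b):
--         total += b // 10**j % 10 * 10**p
--     return total
-- ===== Notes on version B (the rewrite author's own statement) =====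
-- stated objective: alternative
-- what changed: B replaces A's interleaved pop-one-digit-per-mask-bit accumulator loop by a scatter algorithm: it first computes the two lists of target positions from the mask bits, then places a's digits and b's digits in two independent passes using random-access digit extraction (a // 10**j % 10), never mutating a, b or mask.
import Mathlib
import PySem

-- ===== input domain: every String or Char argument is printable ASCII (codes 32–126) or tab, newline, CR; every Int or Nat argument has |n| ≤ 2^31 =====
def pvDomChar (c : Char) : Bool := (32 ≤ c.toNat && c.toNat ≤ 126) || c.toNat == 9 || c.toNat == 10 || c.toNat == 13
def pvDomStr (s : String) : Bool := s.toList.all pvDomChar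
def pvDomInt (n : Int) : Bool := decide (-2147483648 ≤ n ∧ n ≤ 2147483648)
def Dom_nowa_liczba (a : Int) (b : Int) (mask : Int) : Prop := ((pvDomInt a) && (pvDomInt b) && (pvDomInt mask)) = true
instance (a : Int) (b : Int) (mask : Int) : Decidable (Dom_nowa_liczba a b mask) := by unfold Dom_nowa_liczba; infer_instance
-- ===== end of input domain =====

-- B is a scatter algorithm: it precomputes from the mask bits the lists of target positions
-- of a's and b's digits and then places each number's digits in two independent random-access
-- passes, never mutating a, b or mask (objective: alternative algorithm, same values everywhere).

-- ===== PORT A =====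
-- the while-loop of A: runs until counter = num_of_digits; fuel = num_of_digits - counter
def nowaLoopA : Nat → Int → Int → Int → Int → Nat → Int
  | 0, _, _, _, liczba, _ => liczba
  | Nat.succ f, a, b, mask, liczba, counter =>
    if PySem.Int.mod mask 2 = 0 then
      nowaLoopA f a (PySem.Int.floordiv b 10) (PySem.Int.floordiv mask 2)
        (liczba + PySem.Int.mod b 10 * 10 ^ counter) (counter + 1)
    else
      nowaLoopA f (PySem.Int.floordiv a 10) b (PySem.Int.floordiv mask 2)
        (liczba + PySem.Int.mod a 10 * 10 ^ counter) (counter + 1)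

def nowa_liczba (a : Int) (b : Int) (mask : Int) : Int :=
  nowaLoopA (PySem.Str.len (PySem.Int.toStr a) + PySem.Str.len (PySem.Int.toStr b)).toNat
    a b mask 0 0

-- ===== PORT B =====
-- [i for i in range(n) if mask // 2**i % 2 == bit]  (exponents i come from range(n), so i ≥ 0
-- and 2**i is ported as 2 ^ i.toNat)
def posListB (n : Int) (mask : Int) (bit : Int) : List Int :=
  (PySem.List.pyRange 0 n 1).filter
    (fun i => PySem.Int.mod (PySem.Int.floordiv mask ((2 : Int) ^ i.toNat)) 2 == bit)

-- the body of B's 'total += x // 10**j % 10 * 10**p' (j, p ≥ 0 from enumerate/range)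
def scatterAddB (x : Int) (total : Int) (jp : Int × Int) : Int :=
  total + PySem.Int.mod (PySem.Int.floordiv x ((10 : Int) ^ jp.1.toNat)) 10 * (10 : Int) ^ jp.2.toNat

def nowa_liczba_alt (a : Int) (b : Int) (mask : Int) : Int :=
  let n := PySem.Str.len (PySem.Int.toStr a) + PySem.Str.len (PySem.Int.toStr b)
  let posA := posListB n mask 1
  let posB := posListB n mask 0
  let total := (PySem.List.enumerate posA 0).foldl (scatterAddB a) 0
  (PySem.List.enumerate posB 0).foldl (scatterAddB b) total

-- ===== PRECONDITION & SPEC =====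
def Spec_nowa_liczba (a : Int) (b : Int) (mask : Int) (out : Int) : Prop := out = nowa_liczba_alt a b mask
instance (a : Int) (b : Int) (mask : Int) (out : Int) : Decidable (Spec_nowa_liczba a b mask out) := by unfold Spec_nowa_liczba; infer_instance

-- ===== CLAIM (what is proved, stated in full; the proofs are below) =====
def Claim_equal_nowa_liczba : Prop := ∀ (a : Int) (b : Int) (mask : Int), Dom_nowa_liczba a b mask → Spec_nowa_liczba a b mask (nowa_liczba a b mask)

-- ===== LEMMAS AND PROOFS =====

-- the value A's loop accumulates, as a Horner-style recursion (proof-side only)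
def pvValB : Nat → Int → Int → Int → Int
  | 0, _, _, _ => 0
  | Nat.succ f, a, b, mask =>
    if PySem.Int.mod mask 2 = 0 then
      PySem.Int.mod b 10 + 10 * pvValB f a (PySem.Int.floordiv b 10) (PySem.Int.floordiv mask 2)
    else
      PySem.Int.mod a 10 + 10 * pvValB f (PySem.Int.floordiv a 10) b (PySem.Int.floordiv mask 2)

-- the digit of x at decimal place j
def pvDig (x : Int) (j : Nat) : Int := PySem.Int.mod (PySem.Int.floordiv x ((10 : Int) ^ j)) 10

-- sum of pvDig x (j+k) * 10^(ps_k) over the position list (proof-side shape of B's passes)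
def pvSA : List Int → Int → Nat → Int
  | [], _, _ => 0
  | p :: ps, x, j => pvDig x j * (10 : Int) ^ p.toNat + pvSA ps x (j + 1)

theorem pv_floordiv_floordiv (x k m : Int) (hk : 0 < k) (hm : 0 < m) :
    PySem.Int.floordiv (PySem.Int.floordiv x k) m = PySem.Int.floordiv x (k * m) := by
  rw [PySem.Int.floordiv_eq_ediv_of_pos hk, PySem.Int.floordiv_eq_ediv_of_pos hm,
    PySem.Int.floordiv_eq_ediv_of_pos (by positivity), Int.ediv_ediv_of_nonneg (le_of_lt hk)]

theorem pvDig_div (x : Int) (j : Nat) : pvDig (PySem.Int.floordiv x 10) j = pvDig x (j + 1) := by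
  unfold pvDig
  rw [pv_floordiv_floordiv x 10 ((10:Int)^j) (by norm_num) (by positivity), pow_succ, mul_comm ((10:Int)^j) 10]

theorem pvSA_div (ps : List Int) (x : Int) (j : Nat) :
    pvSA ps (PySem.Int.floordiv x 10) j = pvSA ps x (j + 1) := by
  induction ps generalizing j with
  | nil => rfl
  | cons p ps ih =>
    simp only [pvSA]
    rw [pvDig_div, ih]

theorem pvSA_shift (ps : List Int) (x : Int) (j : Nat) (hps : ∀ p ∈ ps, 0 ≤ p) :
    pvSA (ps.map (· + 1)) x j = 10 * pvSA ps x j := by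
  induction ps generalizing j with
  | nil => simp [pvSA]
  | cons p ps ih =>
    have hp : (p + 1).toNat = p.toNat + 1 := by
      have := hps p (List.mem_cons_self ..); omega
    simp only [List.map_cons, pvSA, hp, pow_succ]
    rw [ih (j+1) (fun q hq => hps q (List.mem_cons_of_mem _ hq))]
    ring

theorem pv_foldSA (ps : List Int) (x t : Int) (j : Nat) :
    (PySem.List.enumerate ps (j : Int)).foldl (scatterAddB x) t = t + pvSA ps x j := by
  induction ps generalizing t j with
  | nil => simp [PySem.List.enumerate_nil, pvSA]
  | cons p ps ih =>
    rw [PySem.List.enumerate_cons, List.foldl_cons]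
    have : ((j : Int) + 1) = ((j + 1 : Nat) : Int) := by push_cast; ring
    rw [this, ih]
    simp only [scatterAddB, pvSA, pvDig, Int.toNat_natCast]
    ring

theorem pv_pyRange_succ (n : Nat) :
    PySem.List.pyRange 0 ((n : Int) + 1) 1 = 0 :: (PySem.List.pyRange 0 (n : Int) 1).map (· + 1) := by
  rw [PySem.List.pyRange_one 0 ((n : Int) + 1), PySem.List.pyRange_one 0 (n : Int)]
  have h1 : ((n : Int) + 1 - 0).toNat = n + 1 := by omega
  have h2 : ((n : Int) - 0).toNat = n := by omega
  rw [h1, h2, List.range_succ_eq_map]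
  simp only [List.map_cons, List.map_map, Nat.cast_zero, zero_add]
  congr 1
theorem pv_posList_nonneg (n mask bit : Int) : ∀ p ∈ posListB n mask bit, 0 ≤ p := by
  intro p hp
  unfold posListB at hp
  have := (List.mem_filter.mp hp).1
  exact (PySem.List.mem_pyRange_one.mp this).1

-- bit i+1 of mask is bit i of mask // 2
theorem pv_posList_succ (n : Nat) (mask bit : Int) :
    posListB ((n : Int) + 1) mask bit =
      (if PySem.Int.mod mask 2 == bit then [(0 : Int)] else []) ++
        (posListB (n : Int) (PySem.Int.floordiv mask 2) bit).map (· + 1) := by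
  unfold posListB
  rw [pv_pyRange_succ, List.filter_cons, List.filter_map]
  have hpred : ∀ i ∈ PySem.List.pyRange 0 (n : Int) 1,
      ((fun i => PySem.Int.mod (PySem.Int.floordiv mask ((2:Int) ^ i.toNat)) 2 == bit) ∘ (· + 1)) i
        = (fun i => PySem.Int.mod (PySem.Int.floordiv (PySem.Int.floordiv mask 2) ((2:Int) ^ i.toNat)) 2 == bit) i := by
    intro i hi
    have h0 : 0 ≤ i := (PySem.List.mem_pyRange_one.mp hi).1
    have hi1 : (i + 1).toNat = i.toNat + 1 := by omega
    simp only [Function.comp, hi1]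
    rw [pv_floordiv_floordiv mask 2 ((2:Int) ^ i.toNat) (by norm_num) (by positivity),
      pow_succ, mul_comm ((2:Int) ^ i.toNat) 2]
  rw [List.filter_congr hpred]
  have h1 : PySem.Int.floordiv mask ((2:Int) ^ (0:Int).toNat) = mask := by
    rw [show ((2:Int) ^ (0:Int).toNat) = 1 from by norm_num,
      PySem.Int.floordiv_eq_ediv_of_pos (show (0:Int) < 1 by norm_num), Int.ediv_one]
  rw [h1]
  by_cases h : (PySem.Int.mod mask 2 == bit) = true
  · rw [if_pos h, if_pos h, List.singleton_append]
  · rw [if_neg h, if_neg h, List.nil_append]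

-- main invariant: the Horner value of A's interleaved extraction equals B's two scatter sums
theorem pv_main (n : Nat) (a b mask : Int) :
    pvValB n a b mask =
      pvSA (posListB (n : Int) mask 1) a 0 + pvSA (posListB (n : Int) mask 0) b 0 := by
  induction n generalizing a b mask with
  | zero =>
    simp [pvValB, posListB, PySem.List.pyRange_one_eq_nil (by norm_num : (0:Int) ≤ 0), pvSA]
  | succ n ih =>
    have hcast : ((n + 1 : Nat) : Int) = (n : Int) + 1 := by push_cast; ring
    rw [hcast, pv_posList_succ n mask 1, pv_posList_succ n mask 0]
    have hd : ∀ x : Int, pvDig x 0 = PySem.Int.mod x 10 := by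
      intro x
      simp only [pvDig, pow_zero]
      rw [PySem.Int.floordiv_eq_ediv_of_pos (show (0:Int) < 1 by norm_num), Int.ediv_one]
    have hmod : PySem.Int.mod mask 2 = 0 ∨ PySem.Int.mod mask 2 = 1 := by
      rw [PySem.Int.mod_eq_emod_of_pos (by norm_num)]
      omega
    simp only [pvValB]
    rcases hmod with h | h
    · rw [h, if_pos rfl,
        if_neg (by decide : ¬ (((0:Int) == 1) = true)),
        if_pos (by decide : (((0:Int) == 0) = true)),
        List.nil_append, List.singleton_append,
        pvSA_shift _ a 0 (pv_posList_nonneg _ _ _), pvSA,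
        pvSA_shift _ b 1 (pv_posList_nonneg _ _ _), ← pvSA_div, hd b,
        ih a (PySem.Int.floordiv b 10) (PySem.Int.floordiv mask 2)]
      simp only [Int.toNat_zero, pow_zero]
      ring
    · rw [h, if_neg (by norm_num : ¬ ((1:Int) = 0)),
        if_pos (by decide : (((1:Int) == 1) = true)),
        if_neg (by decide : ¬ (((1:Int) == 0) = true)),
        List.nil_append, List.singleton_append,
        pvSA_shift _ b 0 (pv_posList_nonneg _ _ _), pvSA,
        pvSA_shift _ a 1 (pv_posList_nonneg _ _ _), ← pvSA_div, hd a,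
        ih (PySem.Int.floordiv a 10) b (PySem.Int.floordiv mask 2)]
      simp only [Int.toNat_zero, pow_zero]
      ring

theorem nowaLoopA_eq_val (f : Nat) (a b mask liczba : Int) (counter : Nat) :
    nowaLoopA f a b mask liczba counter = liczba + 10 ^ counter * pvValB f a b mask := by
  induction f generalizing a b mask liczba counter with
  | zero => simp [nowaLoopA, pvValB]
  | succ f ih =>
    simp only [nowaLoopA, pvValB]
    split <;> rw [ih] <;> simp [pow_succ] <;> ring

-- ===== VERDICT (by name: the statement is the Claim_ definition above) =====
theorem nowa_liczba_spec : Claim_equal_nowa_liczba := by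
  intro a b mask _
  unfold Spec_nowa_liczba nowa_liczba nowa_liczba_alt
  set n := PySem.Str.len (PySem.Int.toStr a) + PySem.Str.len (PySem.Int.toStr b) with hn
  have hnn : 0 ≤ n := by
    rw [hn, PySem.Str.len_eq, PySem.Str.len_eq]; positivity
  have hcast : ((n.toNat : Nat) : Int) = n := by omega
  rw [nowaLoopA_eq_val]
  have hA := pv_foldSA (posListB n mask 1) a 0 0
  have hB := pv_foldSA (posListB n mask 0) b (0 + pvSA (posListB n mask 1) a 0) 0
  simp only [Nat.cast_zero] at hA hB
  dsimp only
  rw [hA, hB, pv_main n.toNat a b mask, hcast]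
  simp only [pow_zero]
  ring
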